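-- pv_equiv track=rewrite | github.com/mrchristensen/Censor | cesk/limits.py | get_size_identifier
-- ===== SOURCE A (Python) =====
-- def get_size_identifier(identifiers):
--     """ returns the combined string to look up in the size_dict """
--     typ = None
--     for identifier in identifiers:
--         if identifier in ['long', 'float', 'double', 'char', 'short', 'void']:
--             if typ is not None:
--                 typ += ' '+identifier
--             else:
--                 typ = identifier
--         elif (typ is None) and (identifier == 'int'):
--             typ = identifier
--     return typ
-- ===== SOURCE B (Python) =====
-- SIZES = ('long', 'float', 'double', 'char', 'short', 'void')
--
--
-- def get_size_identifier(identifiers):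
--     """ returns the combined string to look up in the size_dict """
--     tokens = [i for i in identifiers if i in SIZES]
--     for i in identifiers:
--         if i in SIZES:
--             break
--         if i == 'int':
--             tokens.insert(0, 'int')
--             break
--     return ' '.join(tokens) if tokens else None
-- ===== Notes on version B (the rewrite author's own statement) =====
-- stated objective: alternative
-- what changed: Replaces the single merged accumulator loop by two staged passes: a comprehension collecting the size keywords, then a short scan that decides whether a leading 'int' precedes every size keyword, followed by one join.
import Mathlib
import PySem

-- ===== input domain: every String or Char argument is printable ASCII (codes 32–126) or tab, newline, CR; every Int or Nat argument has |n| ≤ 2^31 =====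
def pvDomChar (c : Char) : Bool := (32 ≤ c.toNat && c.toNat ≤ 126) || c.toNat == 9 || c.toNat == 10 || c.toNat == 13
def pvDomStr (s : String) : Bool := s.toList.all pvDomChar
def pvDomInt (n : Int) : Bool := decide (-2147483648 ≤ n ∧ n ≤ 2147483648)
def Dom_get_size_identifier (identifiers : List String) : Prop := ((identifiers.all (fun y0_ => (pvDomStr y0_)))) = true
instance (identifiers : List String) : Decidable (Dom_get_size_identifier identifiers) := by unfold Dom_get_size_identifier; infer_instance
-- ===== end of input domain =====

-- B stages the work as collect-then-order-then-join instead of A's single accumulator loop; same result, stated in Claim_equal_.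

-- ===== PORT A =====
-- A: one fold carrying the Optional accumulator typ.
def get_size_identifier (identifiers : List String) : Option String :=
  identifiers.foldl
    (fun typ identifier =>
      if identifier ∈ ["long", "float", "double", "char", "short", "void"] then
        match typ with
        | some t => some (t ++ " " ++ identifier)
        | none => some identifier
      else if typ = none ∧ identifier = "int" then some identifier
      else typ)
    none

-- ===== PORT B =====
def pySIZES : List String := ["long", "float", "double", "char", "short", "void"]

-- exact hand port of Python's ' '.join on a nonempty list (B only joins nonempty token lists)
def joinSp (tokens : List String) : String :=
  match tokens with
  | [] => ""
  | x :: xs => xs.foldl (fun s i => s ++ " " ++ i) x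

-- the ordering-resolution scan of Source B: break at the first size keyword, or prepend-worthy 'int'
def leadInt (identifiers : List String) : Bool :=
  match identifiers with
  | [] => false
  | i :: rest =>
    if i ∈ pySIZES then false
    else if i = "int" then true
    else leadInt rest

def get_size_identifier_alt (identifiers : List String) : Option String :=
  let tokens := identifiers.filter (fun i => i ∈ pySIZES)
  let tokens := if leadInt identifiers then "int" :: tokens else tokens
  if tokens = [] then none else some (joinSp tokens)

-- ===== PRECONDITION & SPEC =====
def Spec_get_size_identifier (identifiers : List String) (out : Option String) : Prop := out = get_size_identifier_alt identifiers
instance (identifiers : List String) (out : Option String) : Decidable (Spec_get_size_identifier identifiers out) := by unfold Spec_get_size_identifier; infer_instance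

-- ===== CLAIM (what is proved, stated in full; the proofs are below) =====
def Claim_equal_get_size_identifier : Prop := ∀ (identifiers : List String), Dom_get_size_identifier identifiers → Spec_get_size_identifier identifiers (get_size_identifier identifiers)

-- ===== LEMMAS AND PROOFS =====

-- once A's accumulator is set, the rest of the fold just appends the size keywords of the suffix
theorem foldA_some (l : List String) (t : String) :
    l.foldl
      (fun typ identifier =>
        if identifier ∈ ["long", "float", "double", "char", "short", "void"] then
          match typ with
          | some t => some (t ++ " " ++ identifier)
          | none => some identifier
        else if typ = none ∧ identifier = "int" then some identifier
        else typ)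
      (some t)
    = some ((l.filter (fun i => i ∈ pySIZES)).foldl (fun s i => s ++ " " ++ i) t) := by
  induction l generalizing t with
  | nil => rfl
  | cons x xs ih =>
    rw [List.foldl_cons, List.filter_cons]
    by_cases hx : x ∈ pySIZES
    · have hx' : x ∈ ["long", "float", "double", "char", "short", "void"] := hx
      rw [if_pos hx']
      rw [if_pos (by simpa using hx)]
      rw [List.foldl_cons, ih]
    · have hx' : x ∉ ["long", "float", "double", "char", "short", "void"] := hx
      rw [if_neg hx', if_neg (show ¬((some t : Option String) = none ∧ x = "int") by simp), ih]
      simp [hx]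

theorem main_eq (l : List String) : get_size_identifier l = get_size_identifier_alt l := by
  induction l with
  | nil => rfl
  | cons x xs ih =>
    by_cases hx : x ∈ pySIZES
    · have hx' : x ∈ ["long", "float", "double", "char", "short", "void"] := hx
      unfold get_size_identifier get_size_identifier_alt
      rw [List.foldl_cons, if_pos hx']
      rw [show (match (none : Option String) with
            | some t => some (t ++ " " ++ x)
            | none => some x) = some x from rfl, foldA_some]
      simp [leadInt, joinSp, hx]
    · have hx' : x ∉ ["long", "float", "double", "char", "short", "void"] := hx
      by_cases hi : x = "int"
      · subst hi
        unfold get_size_identifier get_size_identifier_alt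
        rw [List.foldl_cons, if_neg hx', if_pos ⟨rfl, rfl⟩, foldA_some]
        simp [leadInt, joinSp, hx]
      · have hA : get_size_identifier (x :: xs) = get_size_identifier xs := by
          unfold get_size_identifier
          rw [List.foldl_cons, if_neg hx', if_neg (by simp [hi])]
        have hB : get_size_identifier_alt (x :: xs) = get_size_identifier_alt xs := by
          unfold get_size_identifier_alt
          simp [leadInt, hx, hi]
        rw [hA, hB, ih]

-- ===== VERDICT (by name: the statement is the Claim_ definition above) =====
theorem get_size_identifier_spec : Claim_equal_get_size_identifier := by
  intro l _
  unfold Spec_get_size_identifier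
  exact main_eq l
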